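-- pv_equiv track=rewrite | github.com/niragui/billboard_artist | src/id_finder.py | read_id_from_content
-- ===== SOURCE A (Python) =====
-- ARTIST_ID_HEADER = "data-artist-id"
--
-- def read_id_from_content(
--                          artist_content: str):
--     """
--     Given an artist content from its website, it reads
--     the artist id stored in it.
--
--     Parameters:
--         - artist_content: Content found in the artist website
--     """
--     artist_id = None
--
--     for line in artist_content.split("\n"):
--         start = line.find(ARTIST_ID_HEADER)
--
--         if start < 0:
--             continue
--
--         real_start = line.find("\"", start) + 1
--         end = line.find("\"", real_start)
--
--         artist_id = line[real_start: end]
--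
--     return artist_id
-- ===== SOURCE B (Python) =====
-- ARTIST_ID_HEADER = "data-artist-id"
--
-- def read_id_from_content(artist_content: str):
--     for line in reversed(artist_content.split("\n")):
--         start = line.find(ARTIST_ID_HEADER)
--         if start < 0:
--             continue
--         real_start = line.find("\"", start) + 1
--         end = line.find("\"", real_start)
--         return line[real_start: end]
--     return None
-- ===== Notes on version B (the rewrite author's own statement) =====
-- stated objective: simpler
-- what changed: Replaces the full forward scan that keeps overwriting an accumulator with an early-terminating reverse scan that returns on the first matching line; the per-line parse is kept verbatim.
import Mathlib
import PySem

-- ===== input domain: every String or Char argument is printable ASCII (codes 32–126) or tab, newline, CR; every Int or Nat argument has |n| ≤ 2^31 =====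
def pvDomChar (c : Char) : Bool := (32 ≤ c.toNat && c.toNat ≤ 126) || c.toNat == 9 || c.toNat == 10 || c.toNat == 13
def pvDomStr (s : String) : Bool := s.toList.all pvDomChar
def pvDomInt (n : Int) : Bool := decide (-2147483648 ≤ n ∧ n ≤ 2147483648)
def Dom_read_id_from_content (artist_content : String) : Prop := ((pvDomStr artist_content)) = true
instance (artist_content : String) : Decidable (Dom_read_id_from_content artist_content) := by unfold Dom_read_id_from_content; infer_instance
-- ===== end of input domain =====

-- B replaces A's accumulate-last full forward scan by an early-returning reverse scan over the lines,
-- with the per-line parse kept verbatim; return values are identical (objective: simpler).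

-- ===== PORT A =====
def read_id_from_content (artist_content : String) : Option String :=
  ((PySem.Str.split? artist_content "\n").getD []).foldl
    (fun artist_id line =>
      let start := PySem.Str.find line "data-artist-id"
      if start < 0 then artist_id
      else
        let real_start := PySem.Str.findFrom line "\"" start + 1
        let stop := PySem.Str.findFrom line "\"" real_start
        some (PySem.Str.slice line (some real_start) (some stop)))
    none

-- ===== PORT B =====
def pvRevScan : List String → Option String
  | [] => none
  | line :: rest =>
      let start := PySem.Str.find line "data-artist-id"
      if start < 0 then pvRevScan rest
      else
        let real_start := PySem.Str.findFrom line "\"" start + 1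
        let stop := PySem.Str.findFrom line "\"" real_start
        some (PySem.Str.slice line (some real_start) (some stop))

def read_id_from_content_alt (artist_content : String) : Option String :=
  pvRevScan ((PySem.Str.split? artist_content "\n").getD []).reverse

-- ===== PRECONDITION & SPEC =====
def Spec_read_id_from_content (artist_content : String) (out : Option String) : Prop := out = read_id_from_content_alt artist_content
instance (artist_content : String) (out : Option String) : Decidable (Spec_read_id_from_content artist_content out) := by unfold Spec_read_id_from_content; infer_instance

-- ===== CLAIM (what is proved, stated in full; the proofs are below) =====
def Claim_equal_read_id_from_content : Prop := ∀ (artist_content : String), Dom_read_id_from_content artist_content → Spec_read_id_from_content artist_content (read_id_from_content artist_content)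

-- ===== LEMMAS AND PROOFS =====

theorem pvRevScan_append (l1 l2 : List String) :
    pvRevScan (l1 ++ l2) =
      match pvRevScan l1 with
      | some v => some v
      | none => pvRevScan l2 := by
  induction l1 with
  | nil => simp [pvRevScan]
  | cons x xs ih =>
      simp only [List.cons_append, pvRevScan]
      split_ifs <;> simp [ih]

theorem foldl_eq_revScan (xs : List String) (acc : Option String) :
    xs.foldl
      (fun artist_id line =>
        let start := PySem.Str.find line "data-artist-id"
        if start < 0 then artist_id
        else
          let real_start := PySem.Str.findFrom line "\"" start + 1
          let stop := PySem.Str.findFrom line "\"" real_start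
          some (PySem.Str.slice line (some real_start) (some stop)))
      acc =
    match pvRevScan xs.reverse with
    | some v => some v
    | none => acc := by
  induction xs generalizing acc with
  | nil => simp [pvRevScan]
  | cons x xs ih =>
      simp only [List.foldl_cons, List.reverse_cons, ih, pvRevScan_append]
      simp only [pvRevScan]
      split_ifs <;> cases pvRevScan xs.reverse <;> simp

-- ===== VERDICT (by name: the statement is the Claim_ definition above) =====
theorem read_id_from_content_spec : Claim_equal_read_id_from_content := by
  intro s _
  unfold Spec_read_id_from_content read_id_from_content read_id_from_content_alt
  rw [foldl_eq_revScan]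
  cases pvRevScan ((PySem.Str.split? s "\n").getD []).reverse <;> simp
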